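-- pv_equiv track=rewrite | github.com/y24/TestStat-CLI | utils/DataAggregator.py | aggregate_daily_by_person
-- ===== SOURCE A (Python) =====
-- from collections import defaultdict
--
-- def aggregate_daily_by_person(data):
--     """データ集計（名前別）"""
--     date_name_count = defaultdict(lambda: defaultdict(int))
--     data = [row for row in data if len(row) > 2 and row[2] not in ("", None)]
--
--     for row in data:
--         result, name, date = row[0], row[1], row[2]
--         if result:
--             date_name_count[date][name] += 1
--
--     out_data = {}
--     for date, name_counts in sorted(date_name_count.items()):
--         out_data[date] = {name: count for name, count in sorted(name_counts.items())}
--     return out_data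
-- ===== SOURCE B (Python) =====
-- def aggregate_daily_by_person(data):
--     """データ集計（名前別）: filter once, then count by scanning per sorted distinct key."""
--     rows = [(row[2], row[1]) for row in data
--             if len(row) > 2 and row[2] not in ("", None) and row[0]]
--     out_data = {}
--     for date in sorted({d for d, _ in rows}):
--         names = [n for d, n in rows if d == date]
--         out_data[date] = {n: names.count(n) for n in sorted(set(names))}
--     return out_data
-- ===== Notes on version B (the rewrite author's own statement) =====
-- stated objective: alternative
-- what changed: Replaces A's single pass accumulating a nested defaultdict (then sorting its items) by: filter the rows once into (date, name) pairs, then for each sorted distinct date scan the pairs and count each sorted distinct name with list.count.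
import Mathlib
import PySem

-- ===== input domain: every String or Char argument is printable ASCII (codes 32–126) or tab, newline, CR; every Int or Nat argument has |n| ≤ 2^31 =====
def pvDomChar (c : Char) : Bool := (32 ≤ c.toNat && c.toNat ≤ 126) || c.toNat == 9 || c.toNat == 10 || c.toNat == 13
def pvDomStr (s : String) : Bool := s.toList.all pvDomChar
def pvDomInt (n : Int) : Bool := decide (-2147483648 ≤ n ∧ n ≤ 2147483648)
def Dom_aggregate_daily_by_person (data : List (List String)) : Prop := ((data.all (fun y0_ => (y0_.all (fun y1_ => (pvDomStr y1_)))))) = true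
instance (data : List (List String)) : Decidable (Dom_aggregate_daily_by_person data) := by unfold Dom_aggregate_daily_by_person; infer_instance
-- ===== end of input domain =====

-- B counts per (date, name) by scanning the once-filtered row list per sorted distinct key,
-- instead of A's nested defaultdict accumulation; objective: alternative decomposition (not faster).

-- ===== PORT A =====
-- Output dicts are built by inserting distinct keys in order, so they are ported as their
-- association lists in insertion order. sorted(items()) of a dict compares (key, value) tuples,
-- but keys are distinct, so it is the sort by key fst (exact).
def aggregate_daily_by_person (data : List (List String)) : List (String × List (String × Int)) :=
  let data2 := data.filter (fun row => decide (row.length > 2) && !(PySem.List.pyGetD row 2 "" == ""))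
  let dnc : PySem.Dict String (PySem.Dict String Int) :=
    data2.foldl (fun d row =>
      let result := PySem.List.pyGetD row 0 ""
      let name := PySem.List.pyGetD row 1 ""
      let date := PySem.List.pyGetD row 2 ""
      if result ≠ "" then
        d.modify date PySem.Dict.empty (fun inner => inner.modify name 0 (· + 1))
      else d) PySem.Dict.empty
  (PySem.List.sorted dnc.items (fun p => p.1) false).map (fun p =>
    (p.1, (PySem.List.sorted p.2.items (fun q => q.1) false).map (fun q => (q.1, q.2))))

-- ===== PORT B =====
def aggregate_daily_by_person_alt (data : List (List String)) : List (String × List (String × Int)) :=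
  let rows := (data.filter (fun row =>
      decide (row.length > 2) && !(PySem.List.pyGetD row 2 "" == "") && !(PySem.List.pyGetD row 0 "" == ""))).map
    (fun row => (PySem.List.pyGetD row 2 "", PySem.List.pyGetD row 1 ""))
  let dates := PySem.List.sorted (PySem.Set.ofList (rows.map (·.1))) (fun x => x) false
  dates.map (fun date =>
    let names := (rows.filter (fun p => p.1 == date)).map (·.2)
    (date, (PySem.List.sorted (PySem.Set.ofList names) (fun x => x) false).map
      (fun n => (n, (names.count n : Int)))))

-- ===== PRECONDITION & SPEC =====
def Spec_aggregate_daily_by_person (data : List (List String)) (out : List (String × List (String × Int))) : Prop := out = aggregate_daily_by_person_alt data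
instance (data : List (List String)) (out : List (String × List (String × Int))) : Decidable (Spec_aggregate_daily_by_person data out) := by unfold Spec_aggregate_daily_by_person; infer_instance

-- ===== CLAIM (what is proved, stated in full; the proofs are below) =====
def Claim_equal_aggregate_daily_by_person : Prop := ∀ (data : List (List String)), Dom_aggregate_daily_by_person data → Spec_aggregate_daily_by_person data (aggregate_daily_by_person data)

-- ===== LEMMAS AND PROOFS =====

-- A fold whose step is the identity on the else branch is the fold over the filtered list.
theorem foldl_if_eq_foldl_filter {α β : Type} (p : α → Prop) [DecidablePred p] (f : β → α → β) (l : List α) (init : β) :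
    l.foldl (fun acc x => if p x then f acc x else acc) init = (l.filter (fun x => decide (p x))).foldl f init := by
  induction l generalizing init with
  | nil => rfl
  | cons x xs ih =>
    by_cases h : p x <;> simp [h, ih]

-- The nested counting fold, read at one outer key: it counts the second components of the
-- pairs whose first component is that key, on top of whatever was stored there.
theorem getD_nested_fold (ps : List (String × String)) (d : PySem.Dict String (PySem.Dict String Int)) (c : String) :
    (ps.foldl (fun d p => d.modify p.1 PySem.Dict.empty (fun inner => inner.modify p.2 0 (· + 1))) d).getD c PySem.Dict.empty
      = ((ps.filter (fun p => p.1 == c)).map (·.2)).foldl (fun inner n => inner.modify n 0 (· + 1)) (d.getD c PySem.Dict.empty) := by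
  induction ps generalizing d with
  | nil => rfl
  | cons p ps ih =>
    rw [List.foldl_cons, ih, List.filter_cons]
    by_cases h : p.1 = c
    · simp [h]
    · simp [h, PySem.Dict.getD_modify, Ne.symm h]

-- Sorting key-tagged pairs of distinct keys by fst = tagging the sorted distinct keys.
theorem sorted_map_fst {β : Type} (xs : List String) (v : String → β)
    (l : List (String × β)) (hperm : l.Perm ((PySem.Set.ofList xs).map (fun k => (k, v k)))) :
    PySem.List.sorted l (fun p => p.1) false
      = (PySem.List.sorted (PySem.Set.ofList xs) (fun x => x) false).map (fun k => (k, v k)) := by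
  apply PySem.List.sorted_eq_of_perm_of_pairwise_lt
  · exact ((PySem.List.sorted_perm _ _ _).map _).trans hperm.symm
  · exact List.Pairwise.map _ (fun a b h => h) (PySem.List.sorted_ofList_pairwise_lt xs)

-- ===== VERDICT (by name: the statement is the Claim_ definition above) =====
theorem aggregate_daily_by_person_spec : Claim_equal_aggregate_daily_by_person := by
  intro data _
  show aggregate_daily_by_person data = aggregate_daily_by_person_alt data
  simp only [aggregate_daily_by_person, aggregate_daily_by_person_alt]
  rw [foldl_if_eq_foldl_filter (fun row => PySem.List.pyGetD row 0 "" ≠ "")]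
  rw [List.filter_filter]
  rw [List.filter_congr (q := fun row =>
      decide (row.length > 2) && !(PySem.List.pyGetD row 2 "" == "") && !(PySem.List.pyGetD row 0 "" == ""))
      (by intro a _; simp [decide_not, Bool.beq_eq_decide_eq, Bool.and_comm])]
  rw [show (List.foldl (fun d row =>
        PySem.Dict.modify d (PySem.List.pyGetD row 2 "") PySem.Dict.empty
          (fun inner => PySem.Dict.modify inner (PySem.List.pyGetD row 1 "") 0 (· + 1)))
        (PySem.Dict.empty : PySem.Dict String (PySem.Dict String Int))
        (data.filter (fun row =>
          decide (row.length > 2) && !(PySem.List.pyGetD row 2 "" == "") && !(PySem.List.pyGetD row 0 "" == ""))))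
      = (List.foldl (fun d p =>
        PySem.Dict.modify d p.1 PySem.Dict.empty
          (fun inner => PySem.Dict.modify inner p.2 0 (· + 1)))
        PySem.Dict.empty
        ((data.filter (fun row =>
          decide (row.length > 2) && !(PySem.List.pyGetD row 2 "" == "") && !(PySem.List.pyGetD row 0 "" == ""))).map
          (fun row => (PySem.List.pyGetD row 2 "", PySem.List.pyGetD row 1 "")))) from
      (List.foldl_map (f := fun row => (PySem.List.pyGetD row 2 "", PySem.List.pyGetD row 1 ""))
        (g := fun (d : PySem.Dict String (PySem.Dict String Int)) p =>
          PySem.Dict.modify d p.1 PySem.Dict.empty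
            (fun inner => PySem.Dict.modify inner p.2 0 (· + 1)))).symm]
  set rows := (data.filter (fun row =>
      decide (row.length > 2) && !(PySem.List.pyGetD row 2 "" == "") && !(PySem.List.pyGetD row 0 "" == ""))).map
      (fun row => (PySem.List.pyGetD row 2 "", PySem.List.pyGetD row 1 "")) with hrows
  set D := List.foldl (fun d p =>
      PySem.Dict.modify d p.1 PySem.Dict.empty
        (fun inner => PySem.Dict.modify inner p.2 0 (· + 1)))
      (PySem.Dict.empty : PySem.Dict String (PySem.Dict String Int)) rows with hD
  have hnd : D.keys.Nodup := by
    rw [hD]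
    exact PySem.Dict.nodup_keys_foldl_modify_key rows (fun p => p.1) PySem.Dict.empty
      (fun _ p inner => PySem.Dict.modify inner p.2 0 (· + 1)) PySem.Dict.empty (by simp)
  have hkeys : D.keys = PySem.Set.ofList (rows.map (·.1)) := by
    rw [hD]
    have := PySem.Dict.keys_foldl_modify_key rows (fun p => p.1)
      (PySem.Dict.empty : PySem.Dict String Int)
      (fun _ p inner => PySem.Dict.modify inner p.2 0 (· + 1)) PySem.Dict.empty
    simpa [PySem.Set.update_nil_left] using this
  have hitems : D.items = (PySem.Set.ofList (rows.map (·.1))).map (fun k => (k, D.getD k PySem.Dict.empty)) := by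
    rw [PySem.Dict.items_eq_map_keys D hnd PySem.Dict.empty, hkeys]
  have hsorted : PySem.List.sorted D.items (fun p => p.1) false
      = (PySem.List.sorted (PySem.Set.ofList (rows.map (·.1))) (fun x => x) false).map
          (fun k => (k, D.getD k PySem.Dict.empty)) := by
    apply sorted_map_fst (rows.map (·.1)) (fun k => D.getD k PySem.Dict.empty)
    rw [hitems]
  rw [hsorted, List.map_map]
  apply List.map_congr_left
  intro date _
  have hgetD : D.getD date PySem.Dict.empty
      = PySem.Dict.counter ((rows.filter (fun p => p.1 == date)).map (·.2)) := by
    rw [hD, getD_nested_fold, PySem.Dict.getD_empty, PySem.Dict.counter_eq_foldl]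
  simp only [Function.comp]
  rw [hgetD, ]
  set names := (rows.filter (fun p => p.1 == date)).map (·.2) with hnames
  have hin : PySem.List.sorted (PySem.Dict.counter names).items (fun q => q.1) false
      = (PySem.List.sorted (PySem.Set.ofList names) (fun x => x) false).map
          (fun k => (k, (List.count k names : Int))) := by
    apply sorted_map_fst names (fun k => (List.count k names : Int))
    rw [PySem.Dict.items_counter]
  rw [hin, List.map_map]
  simp
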